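-- pv_equiv track=rewrite | github.com/MaximTiberiu/Blocks-World-Problem | app_files/utils.py | get_max_block_position
-- ===== SOURCE A (Python) =====
-- from math import inf
--
-- def get_max_block_position(initial_state):
--     """
--     Gets the position of the block with the maximum value.
--     ```
--
--     Parameters:
--     -----------
--         :param initial_state: list
--              the list of stacks representing the initial state of the node
--
--     Returns:
--     --------
--         :return: list
--             the list that contains the position of the block in the node with the maximum value
--     """
--     max_block = -inf
--     pos = [-1, -1]
--
--     for i in range(len(initial_state)):
--         for j in range(len(initial_state[i])):
--             if initial_state[i][j] > max_block:
--                 max_block = initial_state[i][j]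
--                 pos = [i, j]
--     return pos
-- ===== SOURCE B (Python) =====
-- def get_max_block_position(initial_state):
--     # Pass 1: compute the maximum block value over all stacks.
--     blocks = [v for stack in initial_state for v in stack]
--     if not blocks:
--         return [-1, -1]
--     m = max(blocks)
--     # Pass 2: return the first position holding that maximum.
--     for i, stack in enumerate(initial_state):
--         for j, v in enumerate(stack):
--             if v == m:
--                 return [i, j]
-- ===== Notes on version B (the rewrite author's own statement) =====
-- stated objective: alternative
-- what changed: Replaces the fused running-max scan (tracking max and position together) by two separate passes: flatten-and-max, then locate the first occurrence of that maximum.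
import Mathlib
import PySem

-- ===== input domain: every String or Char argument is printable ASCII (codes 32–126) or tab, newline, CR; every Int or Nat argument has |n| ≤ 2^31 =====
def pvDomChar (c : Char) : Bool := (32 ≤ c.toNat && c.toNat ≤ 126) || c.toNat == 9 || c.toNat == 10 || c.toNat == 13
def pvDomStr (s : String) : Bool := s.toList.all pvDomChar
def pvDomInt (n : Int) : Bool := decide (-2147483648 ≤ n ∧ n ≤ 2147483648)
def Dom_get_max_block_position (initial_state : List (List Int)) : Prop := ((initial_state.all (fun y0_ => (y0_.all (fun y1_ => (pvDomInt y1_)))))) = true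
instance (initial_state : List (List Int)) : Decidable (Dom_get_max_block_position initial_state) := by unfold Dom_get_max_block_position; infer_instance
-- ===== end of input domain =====

-- B replaces A's fused running-max scan by two passes (flatten+max, then locate the
-- first position equal to that max); same cost, different decomposition.

-- ===== PORT A =====
-- A tracks (max_block, pos); max_block = -inf is modelled as `none` (any Int beats it,
-- exactly as any int > -inf in Python).
def get_max_block_position (initial_state : List (List Int)) : List Int :=
  ((PySem.List.enumerate initial_state 0).foldl
    (fun (st : Option Int × List Int) ir =>
      (PySem.List.enumerate ir.2 0).foldl
        (fun st jv =>
          match st.1 with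
          | none => (some jv.2, [ir.1, jv.1])
          | some m => if m < jv.2 then (some jv.2, [ir.1, jv.1]) else st)
        st)
    ((none : Option Int), ([-1, -1] : List Int))).2

-- ===== PORT B =====
-- scan one stack for the first index holding value m (Source B's inner loop)
def pvLocRow (m : Int) : List Int → Int → Option Int
  | [], _ => none
  | v :: vs, j => if v = m then some j else pvLocRow m vs (j + 1)

-- scan the stacks for the first position holding value m (Source B's outer loop)
def pvLocate (m : Int) : List (List Int) → Int → List Int
  | [], _ => [-1, -1]   -- unreachable when m is the maximum of a nonempty flatten
  | row :: rest, i =>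
    match pvLocRow m row 0 with
    | some j => [i, j]
    | none => pvLocate m rest (i + 1)

def get_max_block_position_alt (initial_state : List (List Int)) : List Int :=
  match PySem.List.max? initial_state.flatten (fun y => y) with
  | none => [-1, -1]
  | some m => pvLocate m initial_state 0

-- ===== PRECONDITION & SPEC =====
def Spec_get_max_block_position (initial_state : List (List Int)) (out : List Int) : Prop := out = get_max_block_position_alt initial_state
instance (initial_state : List (List Int)) (out : List Int) : Decidable (Spec_get_max_block_position initial_state out) := by unfold Spec_get_max_block_position; infer_instance

-- ===== CLAIM (what is proved, stated in full; the proofs are below) =====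
def Claim_equal_get_max_block_position : Prop := ∀ (initial_state : List (List Int)), Dom_get_max_block_position initial_state → Spec_get_max_block_position initial_state (get_max_block_position initial_state)

-- ===== LEMMAS AND PROOFS =====

-- A's loop step, on a flat list of (position, value) pairs
def pvStep (st : Option Int × List Int) (q : List Int × Int) : Option Int × List Int :=
  match st.1 with
  | none => (some q.2, q.1)
  | some m => if m < q.2 then (some q.2, q.1) else st

-- the flat list of (position, value) pairs, stacks indexed from i0
def pvPairs (i0 : Int) (s : List (List Int)) : List (List Int × Int) :=
  (PySem.List.enumerate s i0).flatMap
    (fun ir => (PySem.List.enumerate ir.2 0).map (fun jv => ([ir.1, jv.1], jv.2)))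

theorem pv_foldl_max_or (l : List Int) (a : Int) : l.foldl max a = a ∨ l.foldl max a ∈ l := by
  induction l generalizing a with
  | nil => simp
  | cons x t ih =>
    rcases ih (max a x) with h | h
    · simp only [List.foldl_cons, h]
      rcases max_choice a x with h' | h' <;> simp [h']
    · simp [List.foldl_cons, h]

theorem pvA_flat (s : List (List Int)) :
    get_max_block_position s = ((pvPairs 0 s).foldl pvStep (none, [-1, -1])).2 := by
  simp [get_max_block_position, pvPairs, List.foldl_flatMap, List.foldl_map, pvStep]

theorem pv_map_snd_pvPairs (i0 : Int) (s : List (List Int)) :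
    (pvPairs i0 s).map (·.2) = s.flatten := by
  induction s generalizing i0 with
  | nil => simp [pvPairs]
  | cons row rest ih =>
    simp only [pvPairs, PySem.List.enumerate_cons, List.flatMap_cons, List.map_append,
      List.map_map, List.flatten_cons]
    rw [show ((fun x => x.2) ∘ fun jv : Int × Int => (([i0, jv.1] : List Int), jv.2)) = (·.2) from rfl,
      PySem.List.map_snd_enumerate]
    exact congrArg (row ++ ·) (ih (i0 + 1))

theorem pv_run_some (l : List (List Int × Int)) (m : Int) (p : List Int) :
    l.foldl pvStep (some m, p) =
      (some ((l.map (·.2)).foldl max m),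
        if m < (l.map (·.2)).foldl max m then
          ((l.find? (fun q => q.2 == (l.map (·.2)).foldl max m)).map Prod.fst).getD p
        else p) := by
  induction l generalizing m p with
  | nil => simp
  | cons x t ih =>
    simp only [List.foldl_cons, List.map_cons, List.find?_cons]
    by_cases hx : m < x.2
    · have hstep : pvStep (some m, p) x = (some x.2, x.1) := by simp [pvStep, hx]
      rw [hstep, ih]
      have hmx : max m x.2 = x.2 := by omega
      rw [hmx]
      have hle : x.2 ≤ (t.map (·.2)).foldl max x.2 := (PySem.List.le_foldl_max _ _).1
      by_cases hlt : x.2 < (t.map (·.2)).foldl max x.2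
      · have hne : (x.2 == (t.map (·.2)).foldl max x.2) = false := by
          simp only [beq_eq_false_iff_ne, ne_eq]; omega
        rw [hne]
        have hm : m < (t.map (·.2)).foldl max x.2 := lt_trans hx hlt
        rw [if_pos hlt, if_pos hm]
        -- tail find? is some: the max differs from x.2, hence lies in the tail values
        rcases pv_foldl_max_or (t.map (·.2)) x.2 with h | h
        · omega
        · rcases List.mem_map.mp h with ⟨q, hq, hq2⟩
          have : (t.find? (fun q => q.2 == (t.map (·.2)).foldl max x.2)).isSome :=
            List.find?_isSome.mpr ⟨q, hq, by simp [hq2]⟩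
          rcases Option.isSome_iff_exists.mp this with ⟨q0, hq0⟩
          simp [hq0]
      · have hM : (t.map (·.2)).foldl max x.2 = x.2 := by omega
        rw [hM]
        simp [hx]
    · have hstep : pvStep (some m, p) x = (some m, p) := by simp [pvStep, hx]
      rw [hstep, ih]
      have hmx : max m x.2 = m := by omega
      rw [hmx]
      by_cases hm : m < (t.map (·.2)).foldl max m
      · have hne : (x.2 == (t.map (·.2)).foldl max m) = false := by
          simp only [beq_eq_false_iff_ne, ne_eq]; omega
        rw [hne, if_pos hm]
      · rw [if_neg hm, if_neg hm]

theorem pv_locRow (m : Int) (row : List Int) (j0 : Int) :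
    pvLocRow m row j0 = ((PySem.List.enumerate row j0).find? (fun jv => jv.2 == m)).map (·.1) := by
  induction row generalizing j0 with
  | nil => simp [pvLocRow]
  | cons v vs ih =>
    simp only [pvLocRow, PySem.List.enumerate_cons, List.find?_cons]
    by_cases hv : v = m
    · simp [hv]
    · rw [if_neg hv, show ((j0, v).2 == m) = false by simp [hv]]
      exact ih (j0 + 1)

theorem pv_locate (m : Int) (s : List (List Int)) (i0 : Int) :
    pvLocate m s i0 =
      match (pvPairs i0 s).find? (fun q => q.2 == m) with
      | some q => q.1
      | none => [-1, -1] := by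
  induction s generalizing i0 with
  | nil => simp [pvLocate, pvPairs]
  | cons row rest ih =>
    simp only [pvLocate, pvPairs, PySem.List.enumerate_cons, List.flatMap_cons,
      List.find?_append, pv_locRow, List.find?_map]
    rw [show ((fun q : List Int × Int => q.2 == m) ∘ fun jv : Int × Int => (([i0, jv.1] : List Int), jv.2))
          = (fun jv : Int × Int => jv.2 == m) from rfl]
    cases hf : (PySem.List.enumerate row 0).find? (fun jv => jv.2 == m) with
    | some jv => simp
    | none => simp [ih (i0 + 1), pvPairs]

-- ===== VERDICT (by name: the statement is the Claim_ definition above) =====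
theorem get_max_block_position_spec : Claim_equal_get_max_block_position := by
  unfold Claim_equal_get_max_block_position
  intro s _
  unfold Spec_get_max_block_position get_max_block_position_alt
  rw [pvA_flat]
  cases hp : pvPairs 0 s with
  | nil =>
    have hf : s.flatten = [] := by rw [← pv_map_snd_pvPairs 0, hp]; rfl
    simp [hf, PySem.List.max?]
  | cons x t =>
    have hf : s.flatten = x.2 :: t.map (·.2) := by rw [← pv_map_snd_pvPairs 0, hp]; rfl
    rw [hf, PySem.List.max?_id_cons]
    set M := (t.map (·.2)).foldl max x.2 with hM
    have hfold : ((x :: t).foldl pvStep (none, ([-1, -1] : List Int))).2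
        = (t.foldl pvStep (some x.2, x.1)).2 := by
      simp [List.foldl_cons, pvStep]
    rw [hfold, pv_run_some]
    show _ = pvLocate M s 0
    rw [pv_locate, hp]
    simp only [List.find?_cons]
    have hle : x.2 ≤ M := (PySem.List.le_foldl_max _ _).1
    by_cases hlt : x.2 < M
    · have hne : (x.2 == M) = false := by simp only [beq_eq_false_iff_ne, ne_eq]; omega
      rw [hne, if_pos hlt]
      rcases pv_foldl_max_or (t.map (·.2)) x.2 with h | h
      · omega
      · rcases List.mem_map.mp h with ⟨q, hq, hq2⟩
        have : (t.find? (fun q => q.2 == M)).isSome :=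
          List.find?_isSome.mpr ⟨q, hq, by simp [hq2, ← hM]⟩
        rcases Option.isSome_iff_exists.mp this with ⟨q0, hq0⟩
        simp [← hM, hq0]
    · have hxM : x.2 = M := by omega
      rw [show (x.2 == M) = true by simp [hxM], if_neg hlt]
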